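-- pv_equiv track=rewrite | github.com/mferriz/advent-of-code | advent_of_code/2021/day_19.py | transform
-- ===== SOURCE A (Python) =====
-- def transform(beacon_pos: list, offsets: list, offsets_types: list) -> None:
--     """Transform beacon positions relative to a scanner."""
--     x_prime: int = 0
--     y_prime: int = 0
--     z_prime: int = 0
--     new_positions = []
--
--     for x, y, z in beacon_pos:
--         if offsets_types[0] == 'x':
--             x_prime = x + offsets[0]
--         elif offsets_types[0] == 'rx':
--             x_prime = -x - offsets[0]
--         elif offsets_types[0] == 'y':
--             x_prime = y + offsets[0]
--         elif offsets_types[0] == 'ry':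
--             x_prime = -y - offsets[0]
--         elif offsets_types[0] == 'z':
--             x_prime = z + offsets[0]
--         else:
--             x_prime = -z - offsets[0]
--
--         if offsets_types[1] == 'x':
--             y_prime = x + offsets[1]
--         elif offsets_types[1] == 'rx':
--             y_prime = -x - offsets[1]
--         elif offsets_types[1] == 'y':
--             y_prime = y + offsets[1]
--         elif offsets_types[1] == 'ry':
--             y_prime = -y - offsets[1]
--         elif offsets_types[1] == 'z':
--             y_prime = z + offsets[1]
--         else:
--             y_prime = -z - offsets[1]
--
--         if offsets_types[2] == 'x':
--             z_prime = x + offsets[2]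
--         elif offsets_types[2] == 'rx':
--             z_prime = -x - offsets[2]
--         elif offsets_types[2] == 'y':
--             z_prime = y + offsets[2]
--         elif offsets_types[2] == 'ry':
--             z_prime = -y - offsets[2]
--         elif offsets_types[2] == 'z':
--             z_prime = z + offsets[2]
--         else:
--             z_prime = -z - offsets[2]
--         new_positions.append((x_prime, y_prime, z_prime))
--     return new_positions
-- ===== SOURCE B (Python) =====
-- def _row(t, o):
--     """Matrix row (a, b, c) and offset term d for one output axis."""
--     table = {'x': (1, 0, 0, 1), 'rx': (-1, 0, 0, -1),
--              'y': (0, 1, 0, 1), 'ry': (0, -1, 0, -1),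
--              'z': (0, 0, 1, 1)}
--     a, b, c, s = table.get(t, (0, 0, -1, -1))
--     return (a, b, c, s * o)
--
--
-- def _apply(row, x, y, z):
--     a, b, c, d = row
--     return a * x + b * y + c * z + d
--
--
-- def transform(beacon_pos: list, offsets: list, offsets_types: list) -> None:
--     """Transform beacon positions relative to a scanner.
--
--     The transform is an affine map: a signed-permutation 3x3 matrix plus an
--     offset vector, built once from offsets_types/offsets, then applied to each
--     beacon by dot products (no branching in the per-beacon pass).
--     """
--     if not beacon_pos:
--         return []
--     r0 = _row(offsets_types[0], offsets[0])
--     r1 = _row(offsets_types[1], offsets[1])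
--     r2 = _row(offsets_types[2], offsets[2])
--     return [(_apply(r0, x, y, z), _apply(r1, x, y, z), _apply(r2, x, y, z))
--             for x, y, z in beacon_pos]
-- ===== Notes on version B (the rewrite author's own statement) =====
-- stated objective: alternative
-- what changed: B expresses the transform as an affine map: it builds a signed-permutation 3x3 matrix and offset vector once from offsets_types/offsets (unknown type strings defaulting to the -z row, as in A's else), then applies it to every beacon by dot products, so the per-beacon pass contains no branching at all, unlike A's three six-way if/elif chains per beacon.
import Mathlib
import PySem

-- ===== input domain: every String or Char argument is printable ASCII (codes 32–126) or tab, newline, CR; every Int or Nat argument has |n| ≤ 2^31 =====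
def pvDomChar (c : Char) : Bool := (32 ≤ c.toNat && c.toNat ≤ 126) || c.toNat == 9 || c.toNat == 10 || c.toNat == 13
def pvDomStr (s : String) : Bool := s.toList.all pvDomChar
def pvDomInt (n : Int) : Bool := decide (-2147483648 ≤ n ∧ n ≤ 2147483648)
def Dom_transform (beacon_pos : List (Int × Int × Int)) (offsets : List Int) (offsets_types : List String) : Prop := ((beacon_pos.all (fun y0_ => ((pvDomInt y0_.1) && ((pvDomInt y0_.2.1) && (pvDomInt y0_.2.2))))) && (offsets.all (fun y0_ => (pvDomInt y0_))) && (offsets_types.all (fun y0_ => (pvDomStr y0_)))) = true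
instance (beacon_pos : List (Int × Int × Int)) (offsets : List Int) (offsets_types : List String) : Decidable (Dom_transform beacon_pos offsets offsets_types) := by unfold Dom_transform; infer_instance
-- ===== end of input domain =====

-- B re-expresses the transform as an affine map: a signed-permutation matrix and
-- offset vector built once, applied per beacon by dot products (objective: alternative).

-- ===== PORT A =====
-- literal port of A's per-beacon if/elif chains, appending to an accumulator list
def transform (beacon_pos : List (Int × Int × Int)) (offsets : List Int) (offsets_types : List String) : List (Int × Int × Int) :=
  beacon_pos.foldl (fun new_positions p =>
    let x := p.1; let y := p.2.1; let z := p.2.2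
    let t0 := (PySem.List.pyGet? offsets_types 0).getD ""
    let o0 := (PySem.List.pyGet? offsets 0).getD 0
    let x_prime :=
      if t0 = "x" then x + o0
      else if t0 = "rx" then -x - o0
      else if t0 = "y" then y + o0
      else if t0 = "ry" then -y - o0
      else if t0 = "z" then z + o0
      else -z - o0
    let t1 := (PySem.List.pyGet? offsets_types 1).getD ""
    let o1 := (PySem.List.pyGet? offsets 1).getD 0
    let y_prime :=
      if t1 = "x" then x + o1
      else if t1 = "rx" then -x - o1
      else if t1 = "y" then y + o1
      else if t1 = "ry" then -y - o1
      else if t1 = "z" then z + o1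
      else -z - o1
    let t2 := (PySem.List.pyGet? offsets_types 2).getD ""
    let o2 := (PySem.List.pyGet? offsets 2).getD 0
    let z_prime :=
      if t2 = "x" then x + o2
      else if t2 = "rx" then -x - o2
      else if t2 = "y" then y + o2
      else if t2 = "ry" then -y - o2
      else if t2 = "z" then z + o2
      else -z - o2
    new_positions ++ [(x_prime, y_prime, z_prime)]) []

-- ===== PORT B =====
-- Source B's _row: matrix row (a,b,c) and offset term d for one output axis
def rowB (t : String) (o : Int) : Int × Int × Int × Int :=
  let q := (PySem.Dict.get? (PySem.Dict.ofList
    [("x", ((1 : Int), (0 : Int), (0 : Int), (1 : Int))),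
     ("rx", ((-1 : Int), (0 : Int), (0 : Int), (-1 : Int))),
     ("y", ((0 : Int), (1 : Int), (0 : Int), (1 : Int))),
     ("ry", ((0 : Int), (-1 : Int), (0 : Int), (-1 : Int))),
     ("z", ((0 : Int), (0 : Int), (1 : Int), (1 : Int)))]) t).getD
    ((0 : Int), (0 : Int), (-1 : Int), (-1 : Int))
  (q.1, q.2.1, q.2.2.1, q.2.2.2 * o)

-- Source B's _apply: dot product of one matrix row with the beacon, plus the offset term
def applyB (r : Int × Int × Int × Int) (x y z : Int) : Int :=
  r.1 * x + r.2.1 * y + r.2.2.1 * z + r.2.2.2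

def transform_alt (beacon_pos : List (Int × Int × Int)) (offsets : List Int) (offsets_types : List String) : List (Int × Int × Int) :=
  if beacon_pos = [] then []
  else
    let r0 := rowB ((PySem.List.pyGet? offsets_types 0).getD "") ((PySem.List.pyGet? offsets 0).getD 0)
    let r1 := rowB ((PySem.List.pyGet? offsets_types 1).getD "") ((PySem.List.pyGet? offsets 1).getD 0)
    let r2 := rowB ((PySem.List.pyGet? offsets_types 2).getD "") ((PySem.List.pyGet? offsets 2).getD 0)
    beacon_pos.map (fun p => (applyB r0 p.1 p.2.1 p.2.2, applyB r1 p.1 p.2.1 p.2.2, applyB r2 p.1 p.2.1 p.2.2))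

-- ===== PRECONDITION & SPEC =====
-- Pre_ excludes exactly the inputs where Python A raises IndexError: a nonempty beacon
-- list with fewer than three offsets or fewer than three offset types.
def Pre_transform (beacon_pos : List (Int × Int × Int)) (offsets : List Int) (offsets_types : List String) : Prop :=
  beacon_pos = [] ∨ (3 ≤ offsets.length ∧ 3 ≤ offsets_types.length)
instance (beacon_pos : List (Int × Int × Int)) (offsets : List Int) (offsets_types : List String) : Decidable (Pre_transform beacon_pos offsets offsets_types) := by unfold Pre_transform; infer_instance
def pvWitness_transform : (List (Int × Int × Int)) × List Int × List String :=
  ([(1, 2, 3), (-4, 0, 5)], [10, -20, 30], ["y", "rz", "rx"])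
def Spec_transform (beacon_pos : List (Int × Int × Int)) (offsets : List Int) (offsets_types : List String) (out : List (Int × Int × Int)) : Prop := out = transform_alt beacon_pos offsets offsets_types
instance (beacon_pos : List (Int × Int × Int)) (offsets : List Int) (offsets_types : List String) (out : List (Int × Int × Int)) : Decidable (Spec_transform beacon_pos offsets offsets_types out) := by unfold Spec_transform; infer_instance

-- ===== CLAIM (what is proved, stated in full; the proofs are below) =====
def Claim_equal_transform : Prop := ∀ (beacon_pos : List (Int × Int × Int)) (offsets : List Int) (offsets_types : List String), Dom_transform beacon_pos offsets offsets_types → Pre_transform beacon_pos offsets offsets_types → Spec_transform beacon_pos offsets offsets_types (transform beacon_pos offsets offsets_types)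

-- ===== LEMMAS AND PROOFS =====

-- A's six-way if/elif chain for one axis equals B's affine row applied to the beacon.
theorem chain_eq_rowB (t : String) (o x y z : Int) :
    (if t = "x" then x + o
     else if t = "rx" then -x - o
     else if t = "y" then y + o
     else if t = "ry" then -y - o
     else if t = "z" then z + o
     else -z - o) = applyB (rowB t o) x y z := by
  split_ifs with h1 h2 h3 h4 h5
  · subst h1; rw [show rowB "x" o = (1, 0, 0, 1 * o) from rfl]; simp [applyB]
  · subst h2; rw [show rowB "rx" o = (-1, 0, 0, -1 * o) from rfl]; simp [applyB]; ring
  · subst h3; rw [show rowB "y" o = (0, 1, 0, 1 * o) from rfl]; simp [applyB]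
  · subst h4; rw [show rowB "ry" o = (0, -1, 0, -1 * o) from rfl]; simp [applyB]; ring
  · subst h5; rw [show rowB "z" o = (0, 0, 1, 1 * o) from rfl]; simp [applyB]
  · have e1 : ("x" == t) = false := beq_eq_false_iff_ne.mpr fun h => h1 h.symm
    have e2 : ("rx" == t) = false := beq_eq_false_iff_ne.mpr fun h => h2 h.symm
    have e3 : ("y" == t) = false := beq_eq_false_iff_ne.mpr fun h => h3 h.symm
    have e4 : ("ry" == t) = false := beq_eq_false_iff_ne.mpr fun h => h4 h.symm
    have e5 : ("z" == t) = false := beq_eq_false_iff_ne.mpr fun h => h5 h.symm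
    have hr : rowB t o = (0, 0, -1, -1 * o) := by
      unfold rowB
      rw [show PySem.Dict.ofList
        [("x", ((1 : Int), (0 : Int), (0 : Int), (1 : Int))),
         ("rx", ((-1 : Int), (0 : Int), (0 : Int), (-1 : Int))),
         ("y", ((0 : Int), (1 : Int), (0 : Int), (1 : Int))),
         ("ry", ((0 : Int), (-1 : Int), (0 : Int), (-1 : Int))),
         ("z", ((0 : Int), (0 : Int), (1 : Int), (1 : Int)))] = PySem.Dict.mk
        [("x", ((1 : Int), (0 : Int), (0 : Int), (1 : Int))),
         ("rx", ((-1 : Int), (0 : Int), (0 : Int), (-1 : Int))),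
         ("y", ((0 : Int), (1 : Int), (0 : Int), (1 : Int))),
         ("ry", ((0 : Int), (-1 : Int), (0 : Int), (-1 : Int))),
         ("z", ((0 : Int), (0 : Int), (1 : Int), (1 : Int)))] from rfl]
      simp [PySem.Dict.get?_mk_cons, e1, e2, e3, e4, e5, PySem.Dict.get?]
    rw [hr]; simp [applyB]; ring

-- A's foldl-append loop produces the accumulator followed by a map.
theorem foldl_append_map (g : (Int × Int × Int) → (Int × Int × Int))
    (bp : List (Int × Int × Int)) (acc : List (Int × Int × Int)) :
    bp.foldl (fun a p => a ++ [g p]) acc = acc ++ bp.map g := by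
  induction bp generalizing acc with
  | nil => simp
  | cons h t ih => simp [List.foldl, ih]

-- ===== VERDICT (by name: the statement is the Claim_ definition above) =====
theorem transform_spec : Claim_equal_transform := by
  intro bp offsets ot _ _
  unfold Spec_transform transform transform_alt
  cases bp with
  | nil => simp
  | cons h t =>
    rw [if_neg (by simp : ¬ (h :: t : List (Int × Int × Int)) = [])]
    have hc : List.foldl
        (fun (new_positions : List (Int × Int × Int)) (p : Int × Int × Int) =>
          new_positions ++
            [((if (PySem.List.pyGet? ot 0).getD "" = "x" then p.1 + (PySem.List.pyGet? offsets 0).getD 0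
               else if (PySem.List.pyGet? ot 0).getD "" = "rx" then -p.1 - (PySem.List.pyGet? offsets 0).getD 0
               else if (PySem.List.pyGet? ot 0).getD "" = "y" then p.2.1 + (PySem.List.pyGet? offsets 0).getD 0
               else if (PySem.List.pyGet? ot 0).getD "" = "ry" then -p.2.1 - (PySem.List.pyGet? offsets 0).getD 0
               else if (PySem.List.pyGet? ot 0).getD "" = "z" then p.2.2 + (PySem.List.pyGet? offsets 0).getD 0
               else -p.2.2 - (PySem.List.pyGet? offsets 0).getD 0),
              (if (PySem.List.pyGet? ot 1).getD "" = "x" then p.1 + (PySem.List.pyGet? offsets 1).getD 0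
               else if (PySem.List.pyGet? ot 1).getD "" = "rx" then -p.1 - (PySem.List.pyGet? offsets 1).getD 0
               else if (PySem.List.pyGet? ot 1).getD "" = "y" then p.2.1 + (PySem.List.pyGet? offsets 1).getD 0
               else if (PySem.List.pyGet? ot 1).getD "" = "ry" then -p.2.1 - (PySem.List.pyGet? offsets 1).getD 0
               else if (PySem.List.pyGet? ot 1).getD "" = "z" then p.2.2 + (PySem.List.pyGet? offsets 1).getD 0
               else -p.2.2 - (PySem.List.pyGet? offsets 1).getD 0),
              (if (PySem.List.pyGet? ot 2).getD "" = "x" then p.1 + (PySem.List.pyGet? offsets 2).getD 0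
               else if (PySem.List.pyGet? ot 2).getD "" = "rx" then -p.1 - (PySem.List.pyGet? offsets 2).getD 0
               else if (PySem.List.pyGet? ot 2).getD "" = "y" then p.2.1 + (PySem.List.pyGet? offsets 2).getD 0
               else if (PySem.List.pyGet? ot 2).getD "" = "ry" then -p.2.1 - (PySem.List.pyGet? offsets 2).getD 0
               else if (PySem.List.pyGet? ot 2).getD "" = "z" then p.2.2 + (PySem.List.pyGet? offsets 2).getD 0
               else -p.2.2 - (PySem.List.pyGet? offsets 2).getD 0))])
        [] (h :: t) =
      List.foldl
        (fun a p => a ++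
          [(applyB (rowB ((PySem.List.pyGet? ot 0).getD "") ((PySem.List.pyGet? offsets 0).getD 0)) p.1 p.2.1 p.2.2,
            applyB (rowB ((PySem.List.pyGet? ot 1).getD "") ((PySem.List.pyGet? offsets 1).getD 0)) p.1 p.2.1 p.2.2,
            applyB (rowB ((PySem.List.pyGet? ot 2).getD "") ((PySem.List.pyGet? offsets 2).getD 0)) p.1 p.2.1 p.2.2)])
        [] (h :: t) := by
      congr 1
      funext a p
      rw [chain_eq_rowB, chain_eq_rowB, chain_eq_rowB]
    rw [hc, foldl_append_map]
    simp
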